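-- pv_equiv track=rewrite | github.com/ChengHSUHSU/KDD_Cup2022_AmazonProductSearchESCI | utils.py | build_first_word2words
-- ===== SOURCE A (Python) =====
-- def build_first_word2words(words=list):
--     # init
--     first_word_ord2words= dict()
--     # main
--     for i in range(len(words)):
--         w = words[i]
--         w = w.lower()
--         if len(w) >= 2:
--             first_word_ord = str(ord(w[0])) + '-' + str(ord(w[1]))
--             if first_word_ord not in first_word_ord2words:
--                 first_word_ord2words[first_word_ord] = []
--             first_word_ord2words[first_word_ord].append([w, i])
--     return first_word_ord2words
-- ===== SOURCE B (Python) =====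
-- def build_first_word2words(words=list):
--     # one pass to key the usable words, then group by first-occurrence key order
--     pairs = []
--     for i, w in enumerate(words):
--         lw = w.lower()
--         if len(lw) >= 2:
--             pairs.append((str(ord(lw[0])) + '-' + str(ord(lw[1])), [lw, i]))
--     keys = []
--     for k, _ in pairs:
--         if k not in keys:
--             keys.append(k)
--     return {k: [e for kk, e in pairs if kk == k] for k in keys}
-- ===== Notes on version B (the rewrite author's own statement) =====
-- stated objective: alternative
-- what changed: A builds the dict in one pass, appending [w,i] to a per-key bucket as it scans; B first materialises the flat list of (key, [w,i]) pairs, then dedups the keys in first-occurrence order and builds each group by a per-key scan of the pair list (gather-then-group instead of incremental bucketing).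
import Mathlib
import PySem

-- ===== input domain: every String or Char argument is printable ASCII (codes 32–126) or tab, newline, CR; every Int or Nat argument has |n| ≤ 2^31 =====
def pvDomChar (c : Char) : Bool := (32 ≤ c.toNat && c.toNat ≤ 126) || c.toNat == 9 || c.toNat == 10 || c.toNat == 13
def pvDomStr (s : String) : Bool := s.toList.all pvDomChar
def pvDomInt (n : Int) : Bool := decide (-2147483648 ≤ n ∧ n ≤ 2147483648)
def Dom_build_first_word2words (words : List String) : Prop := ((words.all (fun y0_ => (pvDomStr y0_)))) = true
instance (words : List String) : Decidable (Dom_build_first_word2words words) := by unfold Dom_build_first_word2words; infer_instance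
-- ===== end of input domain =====

-- B groups by gathering all (key, entry) pairs first and then scanning per distinct key,
-- instead of A's incremental dict bucketing; same result, different decomposition (objective: alternative).

-- str(ord(w[0])) + '-' + str(ord(w[1]))
def pvKey (c0 c1 : Char) : String :=
  PySem.Int.toStr (c0.toNat : Int) ++ "-" ++ PySem.Int.toStr (c1.toNat : Int)

-- ===== PORT A =====
-- loop body of A: w = words[i].lower(); if len(w) >= 2: ensure bucket, append [w, i]
-- (the match on ≥ 2 chars of w.toList is exactly Python's 'if len(w) >= 2' with w[0], w[1])
def pvStepA (d : PySem.Dict String (List (String × Int))) (iw : Int × String) :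
    PySem.Dict String (List (String × Int)) :=
  let w := PySem.Str.lower iw.2
  match w.toList with
  | c0 :: c1 :: _ =>
      let fw := pvKey c0 c1
      let d := if d.contains fw then d else d.insert fw []
      d.modify fw [] (· ++ [(w, iw.1)])
  | _ => d

-- for i in range(len(words)): w = words[i]  ≡  fold over enumerate(words)
def build_first_word2words (words : List String) : List (String × List (String × Int)) :=
  ((PySem.List.enumerate words).foldl pvStepA PySem.Dict.empty).items

-- ===== PORT B =====
-- loop body of B's first pass: pairs.append((key, [lw, i])) when len(lw) >= 2
def pvStepB (acc : List (String × (String × Int))) (iw : Int × String) :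
    List (String × (String × Int)) :=
  let lw := PySem.Str.lower iw.2
  match lw.toList with
  | c0 :: c1 :: _ => acc ++ [(pvKey c0 c1, (lw, iw.1))]
  | _ => acc

def build_first_word2words_alt (words : List String) : List (String × List (String × Int)) :=
  let pairs := (PySem.List.enumerate words).foldl pvStepB []
  let keys := pairs.foldl (fun ks p => if p.1 ∈ ks then ks else ks ++ [p.1]) ([] : List String)
  keys.map (fun k => (k, (pairs.filter (fun p => p.1 == k)).map (fun p => p.2)))

-- ===== PRECONDITION & SPEC =====
def Spec_build_first_word2words (words : List String) (out : List (String × List (String × Int))) : Prop := out = build_first_word2words_alt words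
instance (words : List String) (out : List (String × List (String × Int))) : Decidable (Spec_build_first_word2words words out) := by unfold Spec_build_first_word2words; infer_instance

-- ===== CLAIM (what is proved, stated in full; the proofs are below) =====
def Claim_equal_build_first_word2words : Prop := ∀ (words : List String), Dom_build_first_word2words words → Spec_build_first_word2words words (build_first_word2words words)

-- ===== LEMMAS AND PROOFS =====

-- B's first pass with any accumulator
theorem pvStepB_acc (l : List (Int × String)) (acc : List (String × (String × Int))) :
    l.foldl pvStepB acc = acc ++ l.foldl pvStepB [] := by
  induction l generalizing acc with
  | nil => simp
  | cons x t ih =>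
      simp only [List.foldl_cons]
      rw [ih (pvStepB acc x), ih (pvStepB [] x)]
      cases h : (PySem.Str.lower x.2).toList with
      | nil => simp [pvStepB, h]
      | cons c0 rest =>
          cases rest with
          | nil => simp [pvStepB, h]
          | cons c1 r => simp [pvStepB, h]

-- A's ensure-then-append collapses to a single modify
theorem pv_merge (d : PySem.Dict String (List (String × Int))) (k : String) (e : String × Int) :
    (if d.contains k then d else d.insert k []).modify k [] (· ++ [e]) =
      d.modify k [] (· ++ [e]) := by
  by_cases h : d.contains k = true
  · simp [h]
  · have hf : d.contains k = false := by simpa using h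
    rw [if_neg h]
    simp only [PySem.Dict.modify, PySem.Dict.getD_insert_self,
      PySem.Dict.insert_insert_self, PySem.Dict.getD_of_not_contains (h := hf)]

-- A's dict fold over enumerate = modify-fold over B's pair list
theorem pvA_eq_modify (l : List (Int × String)) (d : PySem.Dict String (List (String × Int))) :
    l.foldl pvStepA d =
      (l.foldl pvStepB []).foldl (fun d p => d.modify p.1 [] (fun x => x ++ [p.2])) d := by
  induction l generalizing d with
  | nil => simp
  | cons x t ih =>
      simp only [List.foldl_cons]
      rw [ih (pvStepA d x), pvStepB_acc t (pvStepB [] x), List.foldl_append]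
      cases h : (PySem.Str.lower x.2).toList with
      | nil => simp [pvStepA, pvStepB, h]
      | cons c0 rest =>
          cases rest with
          | nil => simp [pvStepA, pvStepB, h]
          | cons c1 r =>
              simp only [pvStepA, pvStepB, h, List.nil_append, List.foldl_cons, List.foldl_nil]
              rw [pv_merge]

-- B's key pass is PySem.Set.ofList of the keys
theorem pvKeys_eq (pairs : List (String × (String × Int))) :
    pairs.foldl (fun ks p => if p.1 ∈ ks then ks else ks ++ [p.1]) ([] : List String) =
      PySem.Set.ofList (pairs.map (fun p => p.1)) := by
  rw [PySem.Set.ofList, List.foldl_map]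
  have hstep : (fun (ks : List String) (p : String × (String × Int)) =>
      if p.1 ∈ ks then ks else ks ++ [p.1]) = fun ks p => PySem.Set.add ks p.1 := by
    funext ks p
    by_cases hm : p.1 ∈ ks
    · simp [PySem.Set.add, PySem.Set.contains, hm]
    · simp [PySem.Set.add, PySem.Set.contains, hm]
  rw [hstep]
  rfl

-- ===== VERDICT (by name: the statement is the Claim_ definition above) =====
theorem build_first_word2words_spec : Claim_equal_build_first_word2words := by
  intro words _
  unfold Spec_build_first_word2words build_first_word2words build_first_word2words_alt
  dsimp only
  rw [pvA_eq_modify, pvKeys_eq]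
  set P := (PySem.List.enumerate words).foldl pvStepB [] with hP
  have hnodup : ((P.foldl (fun d p => d.modify p.1 [] (fun x => x ++ [p.2]))
      PySem.Dict.empty).keys).Nodup := by
    apply PySem.Dict.nodup_keys_foldl_modify_key P (fun p => p.1) [] (fun _ p v => v ++ [p.2])
    simp
  rw [PySem.Dict.items_eq_map_keys _ hnodup []]
  rw [PySem.Dict.keys_foldl_modify_key P (fun p => p.1) [] (fun _ p v => v ++ [p.2])]
  rw [show (PySem.Dict.empty : PySem.Dict String (List (String × Int))).keys = [] from rfl,
    PySem.Set.update_nil_left]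
  apply List.map_congr_left
  intro k _
  rw [PySem.Dict.getD_foldl_modify_append]
  simp [PySem.Dict.getD_empty]
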